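-- pv_equiv track=rewrite | github.com/liangruichen/BlogsCrl | BlogsCrl.py | ctr3
-- ===== SOURCE A (Python) =====
-- def ctr3(ct):
--     st1 = "</tr>"
--     l = ct.find("<tr>")
--     r = ct.find(st1, l + 1)
--     tf = ""
--     if ct.find("<td style=\"text-align: right;\">", l) != -1 and ct.find("<td style=\"text-align: right;\">", l) < r:
--         tf = "<td style=\"text-align: right;\">"
--     elif ct.find("<td style=\"text-align: left;\">", l) != -1 and ct.find("<td style=\"text-align: left;\">", l) < r:
--         tf = "<td style=\"text-align: left;\">"
--     else:
--         tf = "<td style=\"text-align: center;\">"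
--
--     w = l
--     ans = "| "
--     while ct.find(tf, w + 1) != -1 and ct.find(tf, w + 1) < r:
--         w = ct.find(tf, w + 1)
--         mes = ""
--         sl = w + len(tf)
--         while ct[sl] != '<' or ct[sl + 1] != '/':
--             mes += ct[sl]
--             sl += 1
--         ans += mes + ' | '
--     rpt = ""
--     for i in range(l):
--         rpt += ct[i]
--     rpt += ans
--     for i in range(r + 5, len(ct)):
--         rpt += ct[i]
--     return rpt
-- ===== SOURCE B (Python) =====
-- def ctr3(ct):
--     TD_R = '<td style="text-align: right;">'
--     TD_L = '<td style="text-align: left;">'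
--     TD_C = '<td style="text-align: center;">'
--     l = ct.find("<tr>")
--     r = ct.find("</tr>", l + 1)
--     if ct.find(TD_R, l) != -1 and ct.find(TD_R, l) < r:
--         tf = TD_R
--     elif ct.find(TD_L, l) != -1 and ct.find(TD_L, l) < r:
--         tf = TD_L
--     else:
--         tf = TD_C
--     cells = []
--     p = ct.find(tf, l + 1)
--     while -1 < p < r:
--         end = ct.find("</", p + len(tf))
--         cells.append(ct[p + len(tf):end])
--         p = ct.find(tf, p + 1)
--     row = "| " + "".join(c + " | " for c in cells)
--     head = ct[:l] if l >= 0 else ""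
--     return head + row + ct[r + 5:]
-- ===== Notes on version B (the rewrite author's own statement) =====
-- stated objective: simpler
-- what changed: B replaces A's character-by-character inner scan and char-copy rebuild loops with a single find('</') plus slicing per cell, collects cells in a list joined at the end, and rebuilds the result from slices ct[:l] and ct[r+5:] instead of per-character accumulation.
import Mathlib
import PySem

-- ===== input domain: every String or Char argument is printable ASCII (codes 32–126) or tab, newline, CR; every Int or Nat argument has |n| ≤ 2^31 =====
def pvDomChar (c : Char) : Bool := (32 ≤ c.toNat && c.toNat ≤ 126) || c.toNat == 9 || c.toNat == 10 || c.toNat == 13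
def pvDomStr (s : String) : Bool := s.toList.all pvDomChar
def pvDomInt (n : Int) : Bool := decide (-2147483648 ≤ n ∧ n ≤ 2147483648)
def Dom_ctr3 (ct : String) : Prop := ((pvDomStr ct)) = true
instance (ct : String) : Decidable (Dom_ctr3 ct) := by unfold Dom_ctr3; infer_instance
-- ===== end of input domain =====

-- B rebuilds each table cell with one find('</') + slice and a final join instead of A's
-- character-by-character scans and per-character copy loops; return values agree on every input.

-- ===== PORT A =====
-- inner `while ct[sl] != '<' or ct[sl+1] != '/'` scan; fuel only makes the recursion structural
-- (ct.length + 1 steps always suffice); the `none` branches are where Python's ct[sl]/ct[sl+1]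
-- would raise IndexError — proved unreachable in the lemmas below (a '</tr>' always lies ahead).
def pvA_scan (ct : List Char) : Int → List Char → Nat → List Char × Int
  | sl, mes, 0 => (mes, sl)
  | sl, mes, fuel+1 =>
    match PySem.List.pyGet? ct sl with
    | none => (mes, sl)
    | some c =>
      if c = '<' then
        match PySem.List.pyGet? ct (sl + 1) with
        | none => (mes, sl)
        | some d =>
          if d = '/' then (mes, sl) else pvA_scan ct (sl + 1) (mes ++ [c]) fuel
      else pvA_scan ct (sl + 1) (mes ++ [c]) fuel

-- outer `while ct.find(tf, w+1) != -1 and ct.find(tf, w+1) < r` loop of A (fuel-structural;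
-- w strictly increases and stays below ct.length, so ct.length + 1 steps suffice)
def pvA_loop (ct tf : List Char) (r : Int) : Int → List Char → Nat → List Char
  | _, ans, 0 => ans
  | w, ans, fuel+1 =>
    let f := PySem.Chars.findFrom ct tf (w + 1) none
    if f ≠ -1 ∧ f < r then
      pvA_loop ct tf r f
        (ans ++ (pvA_scan ct (f + PySem.Chars.len tf) [] (ct.length + 1)).1 ++ " | ".toList) fuel
    else ans

def pvA_core (ct : List Char) : List Char :=
  let l := PySem.Chars.find ct "<tr>".toList
  let r := PySem.Chars.findFrom ct "</tr>".toList (l + 1) none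
  let tf :=
    if PySem.Chars.findFrom ct "<td style=\"text-align: right;\">".toList l none ≠ -1 ∧
       PySem.Chars.findFrom ct "<td style=\"text-align: right;\">".toList l none < r then
      "<td style=\"text-align: right;\">".toList
    else if PySem.Chars.findFrom ct "<td style=\"text-align: left;\">".toList l none ≠ -1 ∧
            PySem.Chars.findFrom ct "<td style=\"text-align: left;\">".toList l none < r then
      "<td style=\"text-align: left;\">".toList
    else "<td style=\"text-align: center;\">".toList
  let ans := pvA_loop ct tf r l "| ".toList (ct.length + 1)
  let rpt := (PySem.List.pyRange 0 l 1).foldl (fun acc i => acc ++ [PySem.List.pyGetD ct i ' ']) []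
  (PySem.List.pyRange (r + 5) (PySem.Chars.len ct) 1).foldl
    (fun acc i => acc ++ [PySem.List.pyGetD ct i ' ']) (rpt ++ ans)

def ctr3 (ct : String) : String := String.ofList (pvA_core ct.toList)

-- ===== PORT B =====
-- B's `while -1 < p < r` loop: one find('</') plus a slice per cell, cells collected in a list
def pvB_loop (ct tf : List Char) (r : Int) : Int → List (List Char) → Nat → List (List Char)
  | _, cells, 0 => cells
  | p, cells, fuel+1 =>
    if -1 < p ∧ p < r then
      pvB_loop ct tf r (PySem.Chars.findFrom ct tf (p + 1) none)
        (cells ++ [PySem.List.slice ct (some (p + PySem.Chars.len tf))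
          (some (PySem.Chars.findFrom ct "</".toList (p + PySem.Chars.len tf) none))]) fuel
    else cells

def pvB_core (ct : List Char) : List Char :=
  let l := PySem.Chars.find ct "<tr>".toList
  let r := PySem.Chars.findFrom ct "</tr>".toList (l + 1) none
  let tf :=
    if PySem.Chars.findFrom ct "<td style=\"text-align: right;\">".toList l none ≠ -1 ∧
       PySem.Chars.findFrom ct "<td style=\"text-align: right;\">".toList l none < r then
      "<td style=\"text-align: right;\">".toList
    else if PySem.Chars.findFrom ct "<td style=\"text-align: left;\">".toList l none ≠ -1 ∧
            PySem.Chars.findFrom ct "<td style=\"text-align: left;\">".toList l none < r then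
      "<td style=\"text-align: left;\">".toList
    else "<td style=\"text-align: center;\">".toList
  let cells := pvB_loop ct tf r (PySem.Chars.findFrom ct tf (l + 1) none) [] (ct.length + 1)
  let row := "| ".toList ++ PySem.Chars.join [] (cells.map (fun c => c ++ " | ".toList))
  (if 0 ≤ l then PySem.List.slice ct none (some l) else []) ++ row ++
    PySem.List.slice ct (some (r + 5)) none

def ctr3_alt (ct : String) : String := String.ofList (pvB_core ct.toList)

-- ===== PRECONDITION & SPEC =====
def Spec_ctr3 (ct : String) (out : String) : Prop := out = ctr3_alt ct
instance (ct : String) (out : String) : Decidable (Spec_ctr3 ct out) := by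
  unfold Spec_ctr3; infer_instance

-- ===== CLAIM (what is proved, stated in full; the proofs are below) =====
def Claim_equal_ctr3 : Prop := ∀ (ct : String), Dom_ctr3 ct → Spec_ctr3 ct (ctr3 ct)

-- ===== LEMMAS AND PROOFS =====

theorem pvJoin_nil_flatten (xs : List (List Char)) : PySem.Chars.join [] xs = xs.flatten := by
  induction xs with
  | nil => simp [PySem.Chars.join_nil]
  | cons a t ih =>
    cases t with
    | nil => simp [PySem.Chars.join_singleton]
    | cons b t' =>
      rw [PySem.Chars.join_cons_cons, ih]
      simp

theorem pvStop_iff (ct : List Char) (q : Nat) :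
    ("</".toList <+: ct.drop q) ↔ (ct[q]? = some '<' ∧ ct[q + 1]? = some '/') := by
  have htl : "</".toList = ['<', '/'] := rfl
  rw [htl]
  constructor
  · rintro ⟨t, ht⟩
    have h0 : (ct.drop q)[0]? = some '<' := by rw [← ht]; rfl
    have h1 : (ct.drop q)[1]? = some '/' := by rw [← ht]; rfl
    rw [List.getElem?_drop] at h0 h1
    constructor
    · simpa using h0
    · simpa using h1
  · rintro ⟨h0, h1⟩
    rcases e : ct.drop q with _ | ⟨a, _ | ⟨b, t⟩⟩
    · have : (ct.drop q)[0]? = some '<' := by rw [List.getElem?_drop]; simpa using h0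
      rw [e] at this; simp at this
    · have : (ct.drop q)[1]? = some '/' := by rw [List.getElem?_drop]; simpa using h1
      rw [e] at this; simp at this
    · have ha : a = '<' := by
        have : (ct.drop q)[0]? = some '<' := by rw [List.getElem?_drop]; simpa using h0
        rw [e] at this; simpa using this
      have hb : b = '/' := by
        have : (ct.drop q)[1]? = some '/' := by rw [List.getElem?_drop]; simpa using h1
        rw [e] at this; simpa using this
      subst ha
      subst hb
      exact ⟨t, rfl⟩

theorem pvOverlap (ct tf : List Char) (p rn : Nat) (htf : '<' ∉ tf.tail)
    (hp : tf <+: ct.drop p) (hc : ct[rn]? = some '<') (hlt : p < rn) :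
    p + tf.length ≤ rn := by
  by_contra h
  have hd : rn - p < tf.length := by omega
  obtain ⟨t, ht⟩ := hp
  have h1 : ct[rn]? = tf[rn - p]? := by
    have h2 : (ct.drop p)[rn - p]? = ct[p + (rn - p)]? := List.getElem?_drop
    rw [show p + (rn - p) = rn by omega] at h2
    rw [← h2, ← ht, List.getElem?_append_left hd]
  have h2 : tf[rn - p]? = some '<' := by rw [← h1]; exact hc
  have h3 : tf.tail[rn - p - 1]? = some '<' := by
    rw [List.getElem?_tail, show rn - p - 1 + 1 = rn - p by omega]
    exact h2
  exact htf (List.mem_of_getElem? h3)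

theorem pvScan_eq (ct : List Char) (q0 : Nat)
    (hstop : ct[q0]? = some '<' ∧ ct[q0 + 1]? = some '/') :
    ∀ (fuel sl : Nat) (acc : List Char), sl ≤ q0 → q0 - sl < fuel →
      (∀ j, sl ≤ j → j < q0 → ¬(ct[j]? = some '<' ∧ ct[j + 1]? = some '/')) →
      pvA_scan ct (sl : Int) acc fuel = (acc ++ (ct.drop sl).take (q0 - sl), (q0 : Int)) := by
  have hq1len : q0 + 1 < ct.length := by
    obtain ⟨h, _⟩ := List.getElem?_eq_some_iff.1 hstop.2
    exact h
  intro fuel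
  induction fuel with
  | zero => intro sl acc h1 h2 h3; omega
  | succ n ih =>
    intro sl acc hsle hfb hmin
    have hcast : (sl : Int) + 1 = ((sl + 1 : Nat) : Int) := by push_cast; ring
    rcases Nat.eq_or_lt_of_le hsle with heq | hlt
    · subst heq
      simp only [pvA_scan, PySem.List.pyGet?_natCast, hstop.1, hcast, hstop.2]
      simp
    · have hsln : sl < ct.length := by omega
      have hget : ct[sl]? = some ct[sl] := List.getElem?_eq_getElem hsln
      have hnot := hmin sl le_rfl hlt
      have hdrop : ct.drop sl = ct[sl] :: ct.drop (sl + 1) := List.drop_eq_getElem_cons hsln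
      have htake : (ct.drop sl).take (q0 - sl) = ct[sl] :: (ct.drop (sl + 1)).take (q0 - (sl + 1)) := by
        rw [hdrop, show q0 - sl = (q0 - (sl + 1)) + 1 by omega, List.take_succ_cons]
      by_cases hc : ct[sl] = '<'
      · have hd : ct[sl + 1]? = some ct[sl + 1] := List.getElem?_eq_getElem (by omega)
        have hdne : ct[sl + 1] ≠ '/' := by
          intro h; exact hnot ⟨by rw [hget, hc], by rw [hd, h]⟩
        simp only [pvA_scan, PySem.List.pyGet?_natCast, hget, hc, hcast, hd, if_neg hdne]
        rw [if_pos trivial]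
        rw [ih (sl + 1) (acc ++ ['<']) (by omega) (by omega)
          (fun j hj1 hj2 => hmin j (by omega) hj2)]
        rw [htake, hc]
        simp
      · simp only [pvA_scan, PySem.List.pyGet?_natCast, hget, if_neg hc, hcast]
        rw [ih (sl + 1) (acc ++ [ct[sl]]) (by omega) (by omega)
          (fun j hj1 hj2 => hmin j (by omega) hj2)]
        rw [htake]
        simp

theorem pvB_loop_acc (ct tf : List Char) (r : Int) :
    ∀ (fuel : Nat) (p : Int) (cells : List (List Char)),
      pvB_loop ct tf r p cells fuel = cells ++ pvB_loop ct tf r p [] fuel := by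
  intro fuel
  induction fuel with
  | zero => intro p cells; simp [pvB_loop]
  | succ n ih =>
    intro p cells
    by_cases h : -1 < p ∧ p < r
    · simp only [pvB_loop, if_pos h]
      rw [ih _ (cells ++ [_]), ih _ ([] ++ [_])]
      simp
    · simp only [pvB_loop, if_neg h]
      simp

theorem pvLoop_agree (ct tf : List Char) (htf : '<' ∉ tf.tail) (r : Int)
    (hr : r = -1 ∨ (0 ≤ r ∧ "</tr>".toList <+: ct.drop r.toNat)) :
    ∀ (fuel : Nat) (w : Int) (ans : List Char), 0 ≤ w + 1 → w + 1 ≤ (ct.length : Int) →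
      pvA_loop ct tf r w ans fuel =
        ans ++ PySem.Chars.join []
          ((pvB_loop ct tf r (PySem.Chars.findFrom ct tf (w + 1) none) [] fuel).map
            (fun c => c ++ " | ".toList)) := by
  intro fuel
  induction fuel with
  | zero =>
    intro w ans _ _
    simp [pvA_loop, pvB_loop, PySem.Chars.join_nil]
  | succ n ih =>
    intro w ans hw0 hw1
    simp only [pvA_loop, pvB_loop]
    set f := PySem.Chars.findFrom ct tf (w + 1) none with hf
    by_cases hfneg : f = -1
    · rw [if_neg (by simp [hfneg]), if_neg (by simp [hfneg])]
      simp [PySem.Chars.join_nil]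
    · have hkle : (w + 1).toNat ≤ ct.length := by omega
      have hk : ((w + 1).toNat : Int) = w + 1 := Int.toNat_of_nonneg hw0
      have hf' : PySem.Chars.findFrom ct tf ((w + 1).toNat : Int) none ≠ -1 := by
        rw [hk]; exact hfneg
      obtain ⟨hge, hpre, _⟩ := PySem.Chars.findFrom_natCast_spec ct tf (w + 1).toNat hkle hf'
      rw [hk] at hge hpre
      rw [← hf] at hge hpre
      have hf0 : (0 : Int) ≤ f := le_trans (by omega) hge
      by_cases hflt : f < r
      · -- iterate: both loops take one step with identical positions
        rcases hr with hr1 | ⟨hr0, hrpre⟩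
        · exact absurd hflt (by omega)
        have hr5 : r.toNat + 5 ≤ ct.length := by
          have h5 := hrpre.length_le
          rw [List.length_drop] at h5
          have : ("</tr>".toList).length = 5 := rfl
          omega
        have hcr : ct[r.toNat]? = some '<' ∧ ct[r.toNat + 1]? = some '/' :=
          (pvStop_iff ct r.toNat).1
            (List.IsPrefix.trans ⟨['t', 'r', '>'], rfl⟩ hrpre)
        have hov : f.toNat + tf.length ≤ r.toNat :=
          pvOverlap ct tf f.toNat r.toNat htf hpre hcr.1 (by omega)
        have hsl : f + PySem.Chars.len tf = ((f.toNat + tf.length : Nat) : Int) := by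
          rw [PySem.Chars.len_eq]; push_cast; omega
        rw [hsl]
        set slN := f.toNat + tf.length with hslN
        have hslle : slN ≤ ct.length := by omega
        have hdd : ct.drop r.toNat = (ct.drop slN).drop (r.toNat - slN) := by
          rw [List.drop_drop]; congr 1; omega
        have hin : "</".toList <:+: ct.drop slN := by
          have h1 : "</".toList <+: (ct.drop slN).drop (r.toNat - slN) := by
            rw [← hdd]
            exact List.IsPrefix.trans ⟨['t', 'r', '>'], rfl⟩ hrpre
          exact h1.isInfix.trans (List.drop_suffix _ _).isInfix
        have hene : PySem.Chars.findFrom ct "</".toList ((slN : Nat) : Int) none ≠ -1 := by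
          intro hcon
          exact ((PySem.Chars.findFrom_natCast_eq_neg_one_iff ct "</".toList slN hslle).1 hcon) hin
        obtain ⟨hege, hepre, hemin⟩ :=
          PySem.Chars.findFrom_natCast_spec ct "</".toList slN hslle hene
        set e := PySem.Chars.findFrom ct "</".toList ((slN : Nat) : Int) none with he
        have he0 : (0 : Int) ≤ e := le_trans (by omega) hege
        have heslN : slN ≤ e.toNat := by omega
        have helen : e.toNat + 2 ≤ ct.length := by
          have h2 := hepre.length_le
          rw [List.length_drop] at h2
          have : ("</".toList).length = 2 := rfl
          omega
        have hestop := (pvStop_iff ct e.toNat).1 hepre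
        have hscan := pvScan_eq ct e.toNat hestop (ct.length + 1) slN [] heslN (by omega)
          (fun j hj1 hj2 hst => hemin j hj1 hj2 ((pvStop_iff ct j).2 hst))
        rw [if_pos ⟨hfneg, hflt⟩, if_pos ⟨by omega, hflt⟩]
        rw [hscan]
        have hcell : PySem.List.slice ct (some ((slN : Nat) : Int)) (some e) =
            (ct.drop slN).take (e.toNat - slN) := by
          rw [PySem.List.slice_toNat ct (by omega) he0]
          simp
        rw [hcell]
        rw [ih f _ (by omega) (by omega)]
        rw [pvB_loop_acc ct tf r n (PySem.Chars.findFrom ct tf (f + 1) none)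
          ([] ++ [List.take (e.toNat - slN) (List.drop slN ct)])]
        rw [pvJoin_nil_flatten, pvJoin_nil_flatten]
        simp
      · rw [if_neg (by tauto), if_neg (by tauto)]
        simp [PySem.Chars.join_nil]

theorem pvTake_map_range (ct : List Char) (n : Nat) (hn : n ≤ ct.length) :
    (List.range n).map (fun k => ct.getD k ' ') = ct.take n := by
  apply List.ext_getElem
  · simp [hn]
  · intro i h1 h2
    simp only [List.getElem_map, List.getElem_range, List.getElem_take]
    have hi : i < ct.length := by
      simp at h2; omega
    rw [List.getD_eq_getElem ct ' ' hi]

theorem pvDrop_map_range (ct : List Char) (s0 : Nat) :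
    (List.range (ct.length - s0)).map (fun k => ct.getD (s0 + k) ' ') = ct.drop s0 := by
  apply List.ext_getElem
  · simp
  · intro i h1 h2
    simp only [List.getElem_map, List.getElem_range, List.getElem_drop]
    have hi : s0 + i < ct.length := by
      simp at h1; omega
    rw [List.getD_eq_getElem ct ' ' hi]

theorem pvPrefix_eq (ct : List Char) (l : Int) (hl : l ≤ (ct.length : Int)) :
    (PySem.List.pyRange 0 l 1).foldl (fun acc i => acc ++ [PySem.List.pyGetD ct i ' ']) []
      = if 0 ≤ l then PySem.List.slice ct none (some l) else [] := by
  by_cases h0 : 0 ≤ l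
  · rw [if_pos h0, PySem.List.slice_to ct h0, PySem.List.foldl_append_singleton_eq_map]
    rw [PySem.List.pyRange_one, List.map_map]
    have hcongr : ∀ k ∈ List.range ((l - 0).toNat),
        ((fun i => PySem.List.pyGetD ct i ' ') ∘ fun k : Nat => (0 : Int) + ↑k) k
          = ct.getD k ' ' := by
      intro k _
      simp [PySem.List.pyGetD_natCast]
    rw [List.map_congr_left hcongr]
    rw [show (l - 0).toNat = l.toNat by omega]
    rw [pvTake_map_range ct l.toNat (by omega)]
    simp
  · rw [if_neg h0, PySem.List.pyRange_one_eq_nil (by omega)]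
    rfl

theorem pvSuffix_eq (ct : List Char) (r : Int) (h0 : 0 ≤ r + 5) (init : List Char) :
    (PySem.List.pyRange (r + 5) (PySem.Chars.len ct) 1).foldl
        (fun acc i => acc ++ [PySem.List.pyGetD ct i ' ']) init
      = init ++ PySem.List.slice ct (some (r + 5)) none := by
  rw [PySem.Chars.len_eq, PySem.List.slice_from ct h0]
  rw [PySem.List.foldl_append_singleton_eq_map]
  rw [PySem.List.pyRange_one, List.map_map]
  have hcongr : ∀ k ∈ List.range (((ct.length : Int) - (r + 5)).toNat),
      ((fun i => PySem.List.pyGetD ct i ' ') ∘ fun k : Nat => (r + 5) + ↑k) k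
        = ct.getD ((r + 5).toNat + k) ' ' := by
    intro k _
    rw [Function.comp_apply, show (r + 5) + (k : Int) = (((r + 5).toNat + k : Nat) : Int) by omega]
    rw [PySem.List.pyGetD_natCast]
  rw [List.map_congr_left hcongr]
  rw [show ((ct.length : Int) - (r + 5)).toNat = ct.length - (r + 5).toNat by omega]
  rw [pvDrop_map_range ct (r + 5).toNat]

theorem pvCore_eq (ct : List Char) : pvA_core ct = pvB_core ct := by
  simp only [pvA_core, pvB_core]
  set l := PySem.Chars.find ct "<tr>".toList with hl
  set r := PySem.Chars.findFrom ct "</tr>".toList (l + 1) none with hr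
  have hlm1 : -1 ≤ l := PySem.Chars.neg_one_le_find ct _
  have hl1 : l + 1 ≤ (ct.length : Int) := by
    by_cases h : 0 ≤ l
    · obtain ⟨hp, _⟩ := PySem.Chars.find_spec (s := ct) (sub := "<tr>".toList) h
      have h4 := hp.length_le
      rw [List.length_drop] at h4
      have : ("<tr>".toList).length = 4 := rfl
      omega
    · omega
  have hrdisj : r = -1 ∨ (0 ≤ r ∧ "</tr>".toList <+: ct.drop r.toNat) := by
    by_cases h : r = -1
    · exact Or.inl h
    · have hk : (((l + 1).toNat : Nat) : Int) = l + 1 := Int.toNat_of_nonneg (by omega)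
      have h' : PySem.Chars.findFrom ct "</tr>".toList (((l + 1).toNat : Nat) : Int) none ≠ -1 := by
        rw [hk]; exact h
      obtain ⟨hge, hpre, _⟩ :=
        PySem.Chars.findFrom_natCast_spec ct "</tr>".toList (l + 1).toNat (by omega) h'
      rw [hk] at hge hpre
      exact Or.inr ⟨le_trans (by omega) hge, hpre⟩
  set tf := (if PySem.Chars.findFrom ct "<td style=\"text-align: right;\">".toList l none ≠ -1 ∧
       PySem.Chars.findFrom ct "<td style=\"text-align: right;\">".toList l none < r then
      "<td style=\"text-align: right;\">".toList
    else if PySem.Chars.findFrom ct "<td style=\"text-align: left;\">".toList l none ≠ -1 ∧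
            PySem.Chars.findFrom ct "<td style=\"text-align: left;\">".toList l none < r then
      "<td style=\"text-align: left;\">".toList
    else "<td style=\"text-align: center;\">".toList) with htfdef
  have htf : '<' ∉ tf.tail := by
    rw [htfdef]
    split_ifs <;> decide
  rw [pvLoop_agree ct tf htf r hrdisj (ct.length + 1) l _ (by omega) hl1]
  rw [pvPrefix_eq ct l (by omega)]
  rw [pvSuffix_eq ct r (by omega)]

-- ===== VERDICT (by name: the statement is the Claim_ definition above) =====
theorem ctr3_spec : Claim_equal_ctr3 := by
  intro ct _
  show ctr3 ct = ctr3_alt ct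
  exact congrArg String.ofList (pvCore_eq ct.toList)
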